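-- pv_equiv track=rewrite | github.com/Brenokly/Teoria_Dos_Grafos | AlgoritmoBFS/BFS.py | breadth_first_search_tree
-- ===== SOURCE A (Python) =====
-- def breadth_first_search_tree(graph, start):
--     adjacency_list = {i: [j for j in range(len(graph[i])) if graph[i][j] == 1] for i in range(len(graph))}  # Lista de adjacência
--     visited = [False] * len(graph)  # Lista de nós visitados
--     queue = [start]  # Fila de nós a serem visitados
--     visited[start] = True  # Marca o nó inicial como visitado
--     bfs_tree_edges = []  # Arestas da árvore BFS
--     bfs_nodes = [start]  # Nós visitados pela BFS
--     parent = {start: None}  # Dicionário para armazenar os pais dos nós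
--
--     # BFS
--     while queue: # Enquanto a fila não estiver vazia
--         node = queue.pop(0) # Remove o primeiro nó da fila
--         for neighbour in adjacency_list[node]: # Para cada vizinho do nó
--             if not visited[neighbour]: # Se o vizinho não foi visitado
--                 queue.append(neighbour) # Adiciona o vizinho na fila
--                 visited[neighbour] = True # Marca o vizinho como visitado
--                 bfs_tree_edges.append((node, neighbour)) # Adiciona a aresta na árvore BFS (opcional)
--                 bfs_nodes.append(neighbour) # Adiciona o vizinho na lista de nós visitados
--                 parent[neighbour] = node # Salva o pai do vizinho
--
--     return bfs_tree_edges, bfs_nodes, parent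
-- ===== SOURCE B (Python) =====
-- def breadth_first_search_tree(graph, start):
--     # Level-synchronous BFS: expand whole frontiers instead of a FIFO queue;
--     # the insertion-ordered `parent` dict doubles as the visited set, and all
--     # three outputs (edges, visit order, parents) are read off it at the end.
--     parent = {start: None}
--     frontier = [start]
--     while frontier:
--         next_level = []
--         for node in frontier:
--             row = graph[node]
--             for j in range(len(row)):
--                 if row[j] == 1 and j not in parent:
--                     parent[j] = node
--                     next_level.append(j)
--         frontier = next_level
--     bfs_tree_edges = [(p, c) for c, p in parent.items() if p is not None]
--     return bfs_tree_edges, list(parent), parent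
-- ===== Notes on version B (the rewrite author's own statement) =====
-- stated objective: alternative
-- what changed: B replaces A's FIFO-queue BFS with precomputed adjacency lists and three separately maintained outputs by a level-synchronous BFS: it expands whole frontiers (current level -> next level) scanning matrix rows directly, keeps only an insertion-ordered parent dict that doubles as the visited set, and derives the edge list and the visit order from that dict at the end.
-- outside the precondition, e.g. on breadth_first_search_tree([[0], [0, 0, 1]], 0): A returns ([], [0], {0: None}), B returns ([], [0], {0: None})
import Mathlib
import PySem

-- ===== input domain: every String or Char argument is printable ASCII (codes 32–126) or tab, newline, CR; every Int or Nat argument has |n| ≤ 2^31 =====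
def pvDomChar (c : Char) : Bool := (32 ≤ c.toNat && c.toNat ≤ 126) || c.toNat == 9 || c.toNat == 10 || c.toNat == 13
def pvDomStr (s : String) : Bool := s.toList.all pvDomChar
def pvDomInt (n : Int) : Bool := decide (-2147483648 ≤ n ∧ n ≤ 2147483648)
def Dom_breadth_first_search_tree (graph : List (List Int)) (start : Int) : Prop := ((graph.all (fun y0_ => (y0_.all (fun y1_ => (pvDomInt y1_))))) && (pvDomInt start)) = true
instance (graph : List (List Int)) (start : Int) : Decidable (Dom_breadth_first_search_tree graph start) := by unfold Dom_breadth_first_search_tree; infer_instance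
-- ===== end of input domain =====

-- B replaces A's FIFO-queue BFS (precomputed adjacency lists, three separately maintained
-- outputs) by a level-synchronous BFS over the matrix rows that keeps only an
-- insertion-ordered parent dict and derives all three outputs from it (objective: alternative).

-- ===== PORT A =====
-- adjacency_list = {i: [j for j in range(len(graph[i])) if graph[i][j] == 1] for i in range(len(graph))}
-- (i ranges over in-bounds indices, so pyGetD graph i [] is exactly graph[i])
def pvAdjA (graph : List (List Int)) : PySem.Dict Int (List Int) :=
  (PySem.List.pyRange 0 graph.length 1).foldl
    (fun d i =>
      let row := PySem.List.pyGetD graph i []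
      d.insert i ((PySem.List.pyRange 0 row.length 1).filter
        (fun j => PySem.List.pyGetD row j 0 = 1)))
    PySem.Dict.empty

-- the body of A's inner `for neighbour in adjacency_list[node]` loop:
-- if not visited[neighbour]: append to queue / mark visited / record edge, node, parent
-- (pyGet? none = IndexError, only outside Pre_; neighbour comes from a range so
--  0 ≤ j and `.set j.toNat` is Python's visited[j] = True)
def pvStepA (node : Int)
    (st : List Int × List Bool × List (Int × Int) × List Int × PySem.Dict Int (Option Int))
    (j : Int) :
    List Int × List Bool × List (Int × Int) × List Int × PySem.Dict Int (Option Int) :=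
  if PySem.List.pyGet? st.2.1 j = some false then
    (st.1 ++ [j], st.2.1.set j.toNat true, st.2.2.1 ++ [(node, j)],
     st.2.2.2.1 ++ [j], st.2.2.2.2.insert j (some node))
  else st

-- the `while queue:` loop of A; fuel `graph.length` bounds the iterations inside
-- Pre_ (each dequeued node was enqueued exactly when first marked visited, and there are
-- only graph.length visited slots), so the fuel-0 branch is unreachable inside Pre_.
def pvBfsA (adj : PySem.Dict Int (List Int)) :
    Nat → List Int → List Bool → List (Int × Int) → List Int → PySem.Dict Int (Option Int) →
    (List (Int × Int)) × List Int × (List (Int × Option Int))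
  | _, [], _, edges, nodes, parent => (edges, nodes, parent.items)
  | 0, _ :: _, _, edges, nodes, parent => (edges, nodes, parent.items)
  | f + 1, node :: queue, visited, edges, nodes, parent =>
    -- for neighbour in adjacency_list[node]:  (KeyError = missing key only outside Pre_)
    let st := (adj.getD node []).foldl (pvStepA node) (queue, visited, edges, nodes, parent)
    pvBfsA adj f st.1 st.2.1 st.2.2.1 st.2.2.2.1 st.2.2.2.2

def breadth_first_search_tree (graph : List (List Int)) (start : Int) :
    (List (Int × Int)) × List Int × (List (Int × Option Int)) :=
  let adj := pvAdjA graph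
  -- visited = [False]*len(graph); visited[start] = True  (0 ≤ start inside Pre_, so .toNat is exact)
  let visited := (List.replicate graph.length false).set start.toNat true
  pvBfsA adj graph.length [start] visited [] [start] (PySem.Dict.empty.insert start none)

-- ===== PORT B =====
-- bfs_tree_edges = [(p, c) for c, p in parent.items() if p is not None]
def pvEdgesOf (parent : PySem.Dict Int (Option Int)) : List (Int × Int) :=
  parent.items.filterMap (fun cp => cp.2.map (fun p => (p, cp.1)))

-- the body of B's inner `for j in range(len(row))` loop:
-- if row[j] == 1 and j not in parent: parent[j] = node; next_level.append(j)
-- (j comes from range(len(row)), so pyGetD row j 0 is exactly row[j])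
def pvStepB (row : List Int) (node : Int)
    (st : List Int × PySem.Dict Int (Option Int)) (j : Int) :
    List Int × PySem.Dict Int (Option Int) :=
  if PySem.List.pyGetD row j 0 = 1 ∧ st.2.contains j = false then
    (st.1 ++ [j], st.2.insert j (some node))
  else st

-- one node of the frontier: row = graph[node]; for j in range(len(row)): …
-- (out-of-range node = IndexError in Python, only outside Pre_)
def pvLevelB (graph : List (List Int))
    (st : List Int × PySem.Dict Int (Option Int)) (node : Int) :
    List Int × PySem.Dict Int (Option Int) :=
  let row := PySem.List.pyGetD graph node []
  (PySem.List.pyRange 0 row.length 1).foldl (pvStepB row node) st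

-- B's `while frontier:` loop; fuel graph.length, each level consuming its size: inside
-- Pre_ the levels are disjoint sets of in-range nodes, so the total size of all levels
-- is at most graph.length and the fuel-0 branch is unreachable.
def pvBfsB (graph : List (List Int)) :
    Nat → List Int → PySem.Dict Int (Option Int) → PySem.Dict Int (Option Int)
  | _, [], parent => parent
  | 0, _ :: _, parent => parent
  | f + 1, node :: rest, parent =>
    -- next_level = []; for node in frontier: …; frontier = next_level
    let st := (node :: rest).foldl (pvLevelB graph) ([], parent)
    pvBfsB graph (f - rest.length) st.1 st.2
termination_by f _ _ => f
decreasing_by omega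

def breadth_first_search_tree_alt (graph : List (List Int)) (start : Int) :
    (List (Int × Int)) × List Int × (List (Int × Option Int)) :=
  let parent := pvBfsB graph graph.length [start] (PySem.Dict.empty.insert start none)
  -- return bfs_tree_edges, list(parent), parent
  (pvEdgesOf parent, parent.keys, parent.items)

-- ===== PRECONDITION & SPEC =====
-- Pre_ excludes (a) a start index outside 0..len(graph)-1 (A raises KeyError/IndexError) and
-- (b) matrices with a 1-entry whose column index is ≥ len(graph): on reachable such entries
-- both programs raise IndexError, and the simple closed-form bound also over-excludes the
-- unreachable ones, on which A returns normally.
def Pre_breadth_first_search_tree (graph : List (List Int)) (start : Int) : Prop :=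
  0 ≤ start ∧ start < graph.length ∧
  ∀ row ∈ graph, ∀ k : Fin row.length, row.get k = 1 → (k : Nat) < graph.length
instance (graph : List (List Int)) (start : Int) : Decidable (Pre_breadth_first_search_tree graph start) := by unfold Pre_breadth_first_search_tree; infer_instance

def pvWitness_breadth_first_search_tree : List (List Int) × Int :=
  ([[0, 1, 1], [1, 0, 0], [0, 1, 0]], 0)

def Spec_breadth_first_search_tree (graph : List (List Int)) (start : Int) (out : (List (Int × Int)) × List Int × (List (Int × Option Int))) : Prop := out = breadth_first_search_tree_alt graph start
instance (graph : List (List Int)) (start : Int) (out : (List (Int × Int)) × List Int × (List (Int × Option Int))) : Decidable (Spec_breadth_first_search_tree graph start out) := by unfold Spec_breadth_first_search_tree; infer_instance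

-- ===== CLAIM (what is proved, stated in full; the proofs are below) =====
def Claim_equal_breadth_first_search_tree : Prop := ∀ (graph : List (List Int)) (start : Int), Dom_breadth_first_search_tree graph start → Pre_breadth_first_search_tree graph start → Spec_breadth_first_search_tree graph start (breadth_first_search_tree graph start)

-- ===== LEMMAS AND PROOFS =====

-- one node of A's `while` loop body, as a fold step over a whole level
def pvLevelA (adj : PySem.Dict Int (List Int))
    (st : List Int × List Bool × List (Int × Int) × List Int × PySem.Dict Int (Option Int))
    (node : Int) :
    List Int × List Bool × List (Int × Int) × List Int × PySem.Dict Int (Option Int) :=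
  (adj.getD node []).foldl (pvStepA node) st

-- number of unvisited slots
def pvCF (vis : List Bool) : Nat := vis.count false

-- the coupling invariant between A's loop state and B's parent dict
def pvInv (n : Nat) (q : List Int) (vis : List Bool) (ed : List (Int × Int))
    (nd : List Int) (par : PySem.Dict Int (Option Int)) : Prop :=
  ed = pvEdgesOf par ∧ nd = par.keys ∧ vis.length = n ∧
  (∀ k : Nat, k < n → (vis.getD k false = true ↔ par.contains (k : Int) = true)) ∧
  (∀ x ∈ q, 0 ≤ x ∧ x < (n : Int))

lemma aux_getD_foldl_not_mem {f : Int → List Int} (l : List Int) (d : PySem.Dict Int (List Int))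
    (node : Int) (h : node ∉ l) :
    ((l.foldl (fun d i => d.insert i (f i)) d).getD node []) = d.getD node [] := by
  induction l generalizing d with
  | nil => rfl
  | cons a t ih =>
    simp only [List.foldl_cons]
    rw [ih _ (by simp_all), PySem.Dict.getD_insert_of_ne _ _ _ (by simp_all)]

lemma getD_foldl_insert_pyRange (f : Int → List Int) (d : PySem.Dict Int (List Int))
    (a b node : Int) (h1 : a ≤ node) (h2 : node < b) :
    ((PySem.List.pyRange a b 1).foldl (fun d i => d.insert i (f i)) d).getD node [] = f node := by
  generalize hm : (b - a).toNat = m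
  induction m generalizing a d with
  | zero => omega
  | succ m ih =>
    rw [PySem.List.pyRange_one_cons (by omega), List.foldl_cons]
    by_cases hn : node = a
    · subst hn
      rw [aux_getD_foldl_not_mem _ _ _ (by simp [PySem.List.mem_pyRange_one]),
        PySem.Dict.getD_insert_self]
    · exact ih _ _ (by omega) (by omega)

lemma pvAdjA_getD (graph : List (List Int)) (node : Int)
    (h0 : 0 ≤ node) (h1 : node < graph.length) :
    (pvAdjA graph).getD node [] =
      (PySem.List.pyRange 0 (PySem.List.pyGetD graph node []).length 1).filter
        (fun j => PySem.List.pyGetD (PySem.List.pyGetD graph node []) j 0 = 1) := by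
  exact getD_foldl_insert_pyRange
    (fun i => (PySem.List.pyRange 0 (PySem.List.pyGetD graph i []).length 1).filter
      (fun j => PySem.List.pyGetD (PySem.List.pyGetD graph i []) j 0 = 1))
    PySem.Dict.empty 0 graph.length node h0 h1

-- setting a false slot to true removes exactly one false
lemma pvCount_false_set : ∀ (vis : List Bool) (i : Nat), vis[i]? = some false →
    (vis.set i true).count false + 1 = vis.count false := by
  intro vis
  induction vis with
  | nil => intro i h; simp at h
  | cons a t ih =>
    intro i h
    cases i with
    | zero => simp_all
    | succ i =>
      simp only [List.getElem?_cons_succ] at h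
      simp only [List.set_cons_succ, List.count_cons]
      have := ih i h
      omega

-- a prefix of A's queue passes unchanged through a row scan (appends land at the end)
lemma pvStepA_prefix (node : Int) (l : List Int) :
    ∀ (rest q : List Int) (vis : List Bool) (ed : List (Int × Int)) (nd : List Int)
      (par : PySem.Dict Int (Option Int)),
      l.foldl (pvStepA node) (rest ++ q, vis, ed, nd, par) =
        (rest ++ (l.foldl (pvStepA node) (q, vis, ed, nd, par)).1,
         (l.foldl (pvStepA node) (q, vis, ed, nd, par)).2) := by
  induction l with
  | nil => intro rest q vis ed nd par; rfl
  | cons j t ih =>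
    intro rest q vis ed nd par
    simp only [List.foldl_cons, pvStepA]
    by_cases h : PySem.List.pyGet? vis j = some false
    · simp only [h, if_pos, List.append_assoc]
      exact ih rest (q ++ [j]) _ _ _ _
    · simp only [h, ite_false]
      exact ih rest q vis ed nd par

-- A's fueled queue loop chews one whole level (fuel = its size) as a fold over the level
lemma pvChewA (adj : PySem.Dict Int (List Int)) :
    ∀ (front : List Int) (f : Nat) (q : List Int) (vis : List Bool)
      (ed : List (Int × Int)) (nd : List Int) (par : PySem.Dict Int (Option Int)),
      pvBfsA adj (front.length + f) (front ++ q) vis ed nd par =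
        pvBfsA adj f
          (front.foldl (pvLevelA adj) (q, vis, ed, nd, par)).1
          (front.foldl (pvLevelA adj) (q, vis, ed, nd, par)).2.1
          (front.foldl (pvLevelA adj) (q, vis, ed, nd, par)).2.2.1
          (front.foldl (pvLevelA adj) (q, vis, ed, nd, par)).2.2.2.1
          (front.foldl (pvLevelA adj) (q, vis, ed, nd, par)).2.2.2.2 := by
  intro front
  induction front with
  | nil =>
    intro f q vis ed nd par
    simp only [List.length_nil, Nat.zero_add, List.nil_append, List.foldl_nil]
  | cons node rest ih =>
    intro f q vis ed nd par
    have hfuel : (node :: rest).length + f = (rest.length + f) + 1 := by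
      simp [List.length_cons]; omega
    rw [hfuel]
    show pvBfsA adj ((rest.length + f) + 1) (node :: (rest ++ q)) vis ed nd par = _
    rw [pvBfsA]
    have hcomm := pvStepA_prefix node (adj.getD node []) rest q vis ed nd par
    simp only [hcomm]
    rw [ih f]
    simp only [List.foldl_cons, pvLevelA]

-- one row scan: A's filtered fold and B's guarded fold walk in lockstep, preserve the
-- invariant, and trade queue growth one-for-one against unvisited slots
lemma pvRowFold (n : Nat) (row : List Int) (node : Int) (l : List Int)
    (hl : ∀ j ∈ l, 0 ≤ j ∧ (PySem.List.pyGetD row j 0 = 1 → j < (n : Int))) :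
    ∀ (q : List Int) (vis : List Bool) (ed : List (Int × Int)) (nd : List Int)
      (par : PySem.Dict Int (Option Int)),
      pvInv n q vis ed nd par →
      (l.foldl (fun st j => if PySem.List.pyGetD row j 0 = 1 then pvStepA node st j else st)
          (q, vis, ed, nd, par)).1 = (l.foldl (pvStepB row node) (q, par)).1 ∧
      (l.foldl (fun st j => if PySem.List.pyGetD row j 0 = 1 then pvStepA node st j else st)
          (q, vis, ed, nd, par)).2.2.2.2 = (l.foldl (pvStepB row node) (q, par)).2 ∧
      pvInv n
        (l.foldl (fun st j => if PySem.List.pyGetD row j 0 = 1 then pvStepA node st j else st)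
          (q, vis, ed, nd, par)).1
        (l.foldl (fun st j => if PySem.List.pyGetD row j 0 = 1 then pvStepA node st j else st)
          (q, vis, ed, nd, par)).2.1
        (l.foldl (fun st j => if PySem.List.pyGetD row j 0 = 1 then pvStepA node st j else st)
          (q, vis, ed, nd, par)).2.2.1
        (l.foldl (fun st j => if PySem.List.pyGetD row j 0 = 1 then pvStepA node st j else st)
          (q, vis, ed, nd, par)).2.2.2.1
        (l.foldl (fun st j => if PySem.List.pyGetD row j 0 = 1 then pvStepA node st j else st)
          (q, vis, ed, nd, par)).2.2.2.2 ∧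
      (l.foldl (fun st j => if PySem.List.pyGetD row j 0 = 1 then pvStepA node st j else st)
          (q, vis, ed, nd, par)).1.length +
        pvCF (l.foldl (fun st j => if PySem.List.pyGetD row j 0 = 1 then pvStepA node st j else st)
          (q, vis, ed, nd, par)).2.1 = q.length + pvCF vis := by
  induction l with
  | nil => intro q vis ed nd par h; exact ⟨rfl, rfl, h, rfl⟩
  | cons j t ih =>
    intro q vis ed nd par h
    obtain ⟨hed, hnd, hlen, hvis, hmem⟩ := h
    simp only [List.foldl_cons]
    by_cases hone : PySem.List.pyGetD row j 0 = 1
    · obtain ⟨hj0, hjn⟩ := hl j (by simp)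
      have hjn := hjn hone
      have hjt : j.toNat < n := by omega
      -- the two guards agree: visited[j] is false iff j is not a key of parent
      have hguard : PySem.List.pyGet? vis j = some false ↔ par.contains j = false := by
        rw [PySem.List.pyGet?_of_nonneg vis hj0]
        have hsome : vis[j.toNat]? = some (vis.getD j.toNat false) := by
          rw [List.getD_eq_getElem?_getD]
          cases hx : vis[j.toNat]? with
          | none => simp at hx; omega
          | some b => simp
        rw [hsome]
        have h2 := hvis j.toNat hjt
        rw [Int.toNat_of_nonneg hj0] at h2
        constructor
        · intro hx; simp only [Option.some.injEq] at hx
          cases hc : par.contains j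
          · rfl
          · rw [h2.mpr hc] at hx; cases hx
        · intro hc
          have hgd : vis.getD j.toNat false = false := by
            cases hgd : vis.getD j.toNat false
            · rfl
            · rw [h2.mp hgd] at hc; cases hc
          rw [hgd]
      rw [if_pos hone]
      by_cases hc : par.contains j = false
      · -- new node discovered: both take their branch
        have hfalse : PySem.List.pyGet? vis j = some false := hguard.mpr hc
        have hA : pvStepA node (q, vis, ed, nd, par) j =
            (q ++ [j], vis.set j.toNat true, ed ++ [(node, j)], nd ++ [j],
             par.insert j (some node)) := by simp [pvStepA, hfalse]
        have hB : pvStepB row node (q, par) j = (q ++ [j], par.insert j (some node)) := by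
          simp [pvStepB, hone, hc]
        rw [hA, hB]
        have hfalse' : vis[j.toNat]? = some false := by
          rw [PySem.List.pyGet?_of_nonneg vis hj0] at hfalse; exact hfalse
        have hcf := pvCount_false_set vis j.toNat hfalse'
        have hrec := ih (fun x hx => hl x (by simp [hx])) (q ++ [j]) (vis.set j.toNat true)
          (ed ++ [(node, j)]) (nd ++ [j]) (par.insert j (some node)) ?_
        · refine ⟨hrec.1, hrec.2.1, hrec.2.2.1, ?_⟩
          rw [hrec.2.2.2]
          simp only [List.length_append, List.length_cons, List.length_nil, pvCF]
          omega
        · refine ⟨?_, ?_, by simp [hlen], ?_, ?_⟩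
          · rw [hed, pvEdgesOf, pvEdgesOf, PySem.Dict.items_insert_of_not_contains _ _ hc]
            simp
          · rw [hnd, PySem.Dict.keys_insert_of_not_contains _ _ hc]
          · intro k hk
            by_cases hkj : k = j.toNat
            · subst hkj
              have hki : ((j.toNat : Nat) : Int) = j := Int.toNat_of_nonneg hj0
              rw [hki, PySem.Dict.contains_insert]
              simp [List.getD_eq_getElem?_getD,
                List.getElem?_set_self (by omega : j.toNat < vis.length)]
            · have hki : (k : Int) ≠ j := by intro hx; exact hkj (by omega)
              rw [PySem.Dict.contains_insert]
              have h3 := hvis k hk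
              simp only [List.getD_eq_getElem?_getD] at h3 ⊢
              rw [List.getElem?_set_ne (by omega : j.toNat ≠ k)]
              simp [hki, h3]
          · intro x hx
            rcases List.mem_append.mp hx with hx | hx
            · exact hmem x hx
            · simp only [List.mem_singleton] at hx; subst hx; exact ⟨hj0, hjn⟩
      · -- already visited: both skip
        have hc2 : par.contains j = true := by simpa using hc
        have hA : pvStepA node (q, vis, ed, nd, par) j = (q, vis, ed, nd, par) := by
          have hng : ¬ PySem.List.pyGet? vis j = some false := by
            intro hx; rw [hguard.mp hx] at hc2; cases hc2
          simp [pvStepA, hng]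
        have hB : pvStepB row node (q, par) j = (q, par) := by
          simp [pvStepB, hc2]
        rw [hA, hB]
        exact ih (fun x hx => hl x (by simp [hx])) q vis ed nd par
          ⟨hed, hnd, hlen, hvis, hmem⟩
    · -- zero entry: A's filter drops it, B's guard is false
      have hB : pvStepB row node (q, par) j = (q, par) := by simp [pvStepB, hone]
      rw [if_neg hone, hB]
      exact ih (fun x hx => hl x (by simp [hx])) q vis ed nd par
        ⟨hed, hnd, hlen, hvis, hmem⟩

-- one whole level: A's fold over the frontier matches B's, preserving everything
lemma pvLevelFold (graph : List (List Int))
    (hpre : ∀ row ∈ graph, ∀ k : Fin row.length, row.get k = 1 → (k : Nat) < graph.length)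
    (front : List Int) (hfront : ∀ x ∈ front, 0 ≤ x ∧ x < (graph.length : Int)) :
    ∀ (q : List Int) (vis : List Bool) (ed : List (Int × Int)) (nd : List Int)
      (par : PySem.Dict Int (Option Int)),
      pvInv graph.length q vis ed nd par →
      (front.foldl (pvLevelA (pvAdjA graph)) (q, vis, ed, nd, par)).1 =
        (front.foldl (pvLevelB graph) (q, par)).1 ∧
      (front.foldl (pvLevelA (pvAdjA graph)) (q, vis, ed, nd, par)).2.2.2.2 =
        (front.foldl (pvLevelB graph) (q, par)).2 ∧
      pvInv graph.length
        (front.foldl (pvLevelA (pvAdjA graph)) (q, vis, ed, nd, par)).1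
        (front.foldl (pvLevelA (pvAdjA graph)) (q, vis, ed, nd, par)).2.1
        (front.foldl (pvLevelA (pvAdjA graph)) (q, vis, ed, nd, par)).2.2.1
        (front.foldl (pvLevelA (pvAdjA graph)) (q, vis, ed, nd, par)).2.2.2.1
        (front.foldl (pvLevelA (pvAdjA graph)) (q, vis, ed, nd, par)).2.2.2.2 ∧
      (front.foldl (pvLevelA (pvAdjA graph)) (q, vis, ed, nd, par)).1.length +
        pvCF (front.foldl (pvLevelA (pvAdjA graph)) (q, vis, ed, nd, par)).2.1 =
        q.length + pvCF vis := by
  induction front with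
  | nil => intro q vis ed nd par h; exact ⟨rfl, rfl, h, rfl⟩
  | cons node rest ih =>
    intro q vis ed nd par h
    obtain ⟨hn0, hnn⟩ := hfront node (by simp)
    have hnt : node.toNat < graph.length := by omega
    have hrow : PySem.List.pyGetD graph node [] = graph[node.toNat] := by
      rw [PySem.List.pyGetD_of_nonneg graph [] hn0, List.getD_eq_getElem?_getD,
        List.getElem?_eq_getElem hnt]
      rfl
    have hl : ∀ j ∈ PySem.List.pyRange 0 (PySem.List.pyGetD graph node []).length 1,
        0 ≤ j ∧ (PySem.List.pyGetD (PySem.List.pyGetD graph node []) j 0 = 1 →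
          j < (graph.length : Int)) := by
      intro j hj
      rw [PySem.List.mem_pyRange_one] at hj
      refine ⟨hj.1, fun hone => ?_⟩
      have hmem2 : PySem.List.pyGetD graph node [] ∈ graph := by
        rw [hrow]; exact List.getElem_mem hnt
      have hjt : j.toNat < (PySem.List.pyGetD graph node []).length := by omega
      have hget : (PySem.List.pyGetD graph node []).get ⟨j.toNat, hjt⟩ = 1 := by
        rw [PySem.List.pyGetD_of_nonneg _ _ hj.1, List.getD_eq_getElem?_getD,
          List.getElem?_eq_getElem hjt] at hone
        simpa using hone
      have h4 := hpre _ hmem2 ⟨j.toNat, hjt⟩ hget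
      simp only at h4
      omega
    simp only [List.foldl_cons]
    -- rewrite A's adjacency-list row as B's guarded scan of the same range
    have hA1 : pvLevelA (pvAdjA graph) (q, vis, ed, nd, par) node =
        ((PySem.List.pyRange 0 (PySem.List.pyGetD graph node []).length 1).foldl
          (fun st j => if PySem.List.pyGetD (PySem.List.pyGetD graph node []) j 0 = 1
            then pvStepA node st j else st) (q, vis, ed, nd, par)) := by
      rw [pvLevelA, pvAdjA_getD graph node hn0 hnn]
      rw [List.foldl_filter]
      simp only [decide_eq_true_eq]
    rw [hA1]
    have hrf := pvRowFold graph.length (PySem.List.pyGetD graph node []) node _ hl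
      q vis ed nd par h
    obtain ⟨hq, hpar, hinv, hcf⟩ := hrf
    have hB1 : pvLevelB graph (q, par) node =
        ((PySem.List.pyRange 0 (PySem.List.pyGetD graph node []).length 1).foldl
          (pvStepB (PySem.List.pyGetD graph node []) node) (q, par)) := rfl
    set sA := (PySem.List.pyRange 0 (PySem.List.pyGetD graph node []).length 1).foldl
      (fun st j => if PySem.List.pyGetD (PySem.List.pyGetD graph node []) j 0 = 1
        then pvStepA node st j else st) (q, vis, ed, nd, par) with hsA
    have hpair : (PySem.List.pyRange 0 (PySem.List.pyGetD graph node []).length 1).foldl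
        (pvStepB (PySem.List.pyGetD graph node []) node) (q, par) = (sA.1, sA.2.2.2.2) :=
      Prod.ext hq.symm hpar.symm
    rw [hB1, hpair]
    have hrec := ih (fun x hx => hfront x (by simp [hx]))
      sA.1 sA.2.1 sA.2.2.1 sA.2.2.2.1 sA.2.2.2.2 hinv
    refine ⟨hrec.1, hrec.2.1, hrec.2.2.1, by rw [hrec.2.2.2]; rw [hcf]⟩

-- the two fueled loops, started at a level boundary with enough fuel, agree
lemma pvLink (graph : List (List Int))
    (hpre : ∀ row ∈ graph, ∀ k : Fin row.length, row.get k = 1 → (k : Nat) < graph.length) :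
    ∀ (f : Nat) (front : List Int) (vis : List Bool) (ed : List (Int × Int))
      (nd : List Int) (par : PySem.Dict Int (Option Int)),
      pvInv graph.length front vis ed nd par →
      front.length + pvCF vis ≤ f →
      pvBfsA (pvAdjA graph) f front vis ed nd par =
        (pvEdgesOf (pvBfsB graph f front par), (pvBfsB graph f front par).keys,
         (pvBfsB graph f front par).items) := by
  intro f
  induction f using Nat.strong_induction_on with
  | _ f ih =>
    intro front vis ed nd par hinv hfuel
    obtain ⟨hed, hnd, hlen, hvis, hmem⟩ := hinv
    cases front with
    | nil =>
      cases f <;> simp [pvBfsA, pvBfsB, hed, hnd]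
    | cons node rest =>
      have hf1 : 1 ≤ f := by simp only [List.length_cons] at hfuel; omega
      obtain ⟨f', rfl⟩ : ∃ f', f = f' + 1 := ⟨f - 1, by omega⟩
      -- unfold B one level
      rw [pvBfsB]
      -- unfold A one level via the chew lemma
      have hchew := pvChewA (pvAdjA graph) (node :: rest) ((f' + 1) - (node :: rest).length)
        [] vis ed nd par
      have hfe : (node :: rest).length + ((f' + 1) - (node :: rest).length) = f' + 1 := by
        simp only [List.length_cons] at hfuel ⊢; omega
      rw [hfe, List.append_nil] at hchew
      rw [hchew]
      have hlf := pvLevelFold graph hpre (node :: rest) hmem [] vis ed nd par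
        ⟨hed, hnd, hlen, hvis, by intro x hx; cases hx⟩
      obtain ⟨hq, hpar, hinv', hcf⟩ := hlf
      have hfe2 : (f' + 1) - (node :: rest).length = f' - rest.length := by
        simp [List.length_cons]
      rw [hq, hpar] at *
      rw [hfe2] at *
      apply ih (f' - rest.length) (by simp only [List.length_cons] at hfuel; omega)
        _ _ _ _ _ hinv'
      -- new fuel bound: |next| + unvisited' = unvisited ≤ f - |front|
      have : ((node :: rest).foldl (pvLevelB graph) ([], par)).1.length +
          pvCF ((node :: rest).foldl (pvLevelA (pvAdjA graph)) ([], vis, ed, nd, par)).2.1 =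
          pvCF vis := by
        rw [← hq]; simpa using hcf
      simp only [List.length_cons] at hfuel
      omega

-- ===== VERDICT (by name: the statement is the Claim_ definition above) =====
theorem breadth_first_search_tree_spec : Claim_equal_breadth_first_search_tree := by
  intro graph start _ hpre
  obtain ⟨h0, h1, hrows⟩ := hpre
  unfold Spec_breadth_first_search_tree breadth_first_search_tree breadth_first_search_tree_alt
  have hst : start.toNat < graph.length := by omega
  have hvis0 : (List.replicate graph.length false)[start.toNat]? = some false :=
    List.getElem?_replicate_of_lt hst
  have hcf : pvCF ((List.replicate graph.length false).set start.toNat true) + 1 =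
      graph.length := by
    have := pvCount_false_set (List.replicate graph.length false) start.toNat hvis0
    rw [List.count_replicate_self] at this
    exact this
  apply pvLink graph hrows graph.length [start]
  · refine ⟨?_, ?_, by simp, ?_, ?_⟩
    · rw [pvEdgesOf, PySem.Dict.items_insert_of_not_contains _ _ (PySem.Dict.contains_empty start)]
      simp [PySem.Dict.empty]
    · rw [PySem.Dict.keys_insert_of_not_contains _ _ (PySem.Dict.contains_empty start)]
      simp [PySem.Dict.empty]
    · intro k hk
      rw [PySem.Dict.contains_insert]
      simp only [PySem.Dict.contains_empty, Bool.or_false]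
      by_cases hkj : k = start.toNat
      · subst hkj
        rw [List.getD_eq_getElem?_getD,
          List.getElem?_set_self (by simpa using hst :
            start.toNat < ((List.replicate graph.length false).length))]
        simp [Int.toNat_of_nonneg h0]
      · have hne : (k : Int) ≠ start := by intro hx; exact hkj (by omega)
        rw [List.getD_eq_getElem?_getD, List.getElem?_set_ne (by omega : start.toNat ≠ k)]
        simp [hne, hk]
    · intro x hx
      simp only [List.mem_singleton] at hx
      subst hx; exact ⟨h0, h1⟩
  · simp only [List.length_cons, List.length_nil]
    omega
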